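-- pv_equiv track=rewrite | github.com/rafaelmeloreisnovo/termux-app-rafacodephi | scripts/termux_build_parser.py | _ends_with_continuation
-- ===== SOURCE A (Python) =====
-- def _ends_with_continuation(line: str) -> bool:
--     # unescaped trailing backslash
--     stripped = line.rstrip("\n")
--     count = 0
--     i = len(stripped) - 1
--     while i >= 0 and stripped[i] == "\\":
--         count += 1
--         i -= 1
--     return count % 2 == 1
-- ===== SOURCE B (Python) =====
-- def _ends_with_continuation(line: str) -> bool:
--     # Forward escape-state scan instead of counting the trailing backslash run.
--     escaped = False
--     for ch in line.rstrip("\n"):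
--         escaped = (not escaped) and ch == "\\"
--     return escaped
-- ===== Notes on version B (the rewrite author's own statement) =====
-- stated objective: idiomatic
-- what changed: B replaces A's backward while-loop counting the trailing backslash run and testing its parity with a single forward pass maintaining an escape-state boolean over the whole stripped line.
import Mathlib
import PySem

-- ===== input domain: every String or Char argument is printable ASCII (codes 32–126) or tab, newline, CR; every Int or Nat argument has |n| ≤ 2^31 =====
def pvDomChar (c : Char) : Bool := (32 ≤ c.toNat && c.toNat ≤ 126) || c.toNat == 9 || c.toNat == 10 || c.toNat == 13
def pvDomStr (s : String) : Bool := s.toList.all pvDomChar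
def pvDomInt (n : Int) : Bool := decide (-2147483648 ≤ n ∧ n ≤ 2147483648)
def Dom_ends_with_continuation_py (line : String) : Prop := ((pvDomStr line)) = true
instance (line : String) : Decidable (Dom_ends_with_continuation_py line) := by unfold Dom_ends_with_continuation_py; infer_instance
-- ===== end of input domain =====

-- B replaces A's backward trailing-backslash-run parity count with a forward escape-state scan (idiomatic; same cost).


-- shared helper: Python's line.rstrip("\n") on the char list (exact: drops trailing '\n' only)
def pvRstripNl (l : List Char) : List Char := (l.reverse.dropWhile (· == '\n')).reverse

-- ===== PORT A =====
-- A's while loop 'i = len-1; while i ≥ 0 and s[i] == \\: count += 1; i -= 1' = count of the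
-- trailing backslash run, scanned from the end; ported as recursion over the reversed list.
def pvCountBack : List Char → Nat
  | [] => 0
  | c :: rest => if c = '\\' then pvCountBack rest + 1 else 0

def ends_with_continuation_py (line : String) : Bool :=
  let stripped := pvRstripNl line.toList
  let count := pvCountBack stripped.reverse
  decide (count % 2 = 1)

-- ===== PORT B =====
def ends_with_continuation_py_alt (line : String) : Bool :=
  (pvRstripNl line.toList).foldl (fun escaped ch => !escaped && ch == '\\') false

-- ===== PRECONDITION & SPEC =====
def Spec_ends_with_continuation_py (line : String) (out : Bool) : Prop := out = ends_with_continuation_py_alt line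
instance (line : String) (out : Bool) : Decidable (Spec_ends_with_continuation_py line out) := by unfold Spec_ends_with_continuation_py; infer_instance

-- ===== CLAIM (what is proved, stated in full; the proofs are below) =====
def Claim_equal_ends_with_continuation_py : Prop := ∀ (line : String), Dom_ends_with_continuation_py line → Spec_ends_with_continuation_py line (ends_with_continuation_py line)

-- ===== LEMMAS AND PROOFS =====

lemma pvCountBack_cons (c : Char) (l : List Char) :
    pvCountBack (c :: l) = if c = '\\' then pvCountBack l + 1 else 0 := rfl

-- the forward escape-state fold computes the parity of the trailing backslash run
lemma pv_fold_eq_parity (l : List Char) :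
    l.foldl (fun escaped ch => !escaped && ch == '\\') false
      = decide (pvCountBack l.reverse % 2 = 1) := by
  induction l using List.reverseRecOn with
  | nil => decide
  | append_singleton l c ih =>
      rw [List.foldl_append, List.foldl_cons, List.foldl_nil, ih,
        List.reverse_append, List.reverse_singleton, List.singleton_append,
        pvCountBack_cons]
      by_cases hc : c = '\\'
      · simp only [hc, beq_self_eq_true, Bool.and_true, if_pos rfl]
        by_cases h : pvCountBack l.reverse % 2 = 1 <;> simp [h] <;> omega
      · simp [hc]

-- ===== VERDICT (by name: the statement is the Claim_ definition above) =====
theorem ends_with_continuation_py_spec : Claim_equal_ends_with_continuation_py := by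
  intro line _
  unfold Spec_ends_with_continuation_py ends_with_continuation_py ends_with_continuation_py_alt
  exact (pv_fold_eq_parity (pvRstripNl line.toList)).symm
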